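-- pv_equiv track=rewrite | github.com/Law-AI/ilsic | Codes/Evaluation/match-data-RAG.py | intelligent_split_section_act
-- ===== SOURCE A (Python) =====
-- from typing import List, Tuple, Dict, Optional
--
-- def normalize_identifier_token(token: str) -> str:
--     result = []
--     for c in token:
--         if c in "([":
--             break
--         if c.isalnum():
--             result.append(c)
--     return "".join(result)
--
-- def analyze_text_structure(text: str) -> Dict:
--     if not text:
--         return {}
--     words = text.split()
--     analysis = {
--         "words": words,
--         "word_count": len(words),
--         "numeric_words": [],
--         "short_alphanum_words": [],
--         "long_words": [],
--         "potential_identifiers": [],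
--     }
--     for i, word in enumerate(words):
--         normalized = normalize_identifier_token(word)
--         if normalized.isdigit():
--             analysis["numeric_words"].append((i, normalized))
--         elif len(normalized) <= 5 and any(c.isdigit() for c in normalized):
--             analysis["short_alphanum_words"].append((i, normalized))
--         elif len(normalized) > 8:
--             analysis["long_words"].append((i, normalized))
--         if len(word) <= 6 and (
--             any(c.isdigit() for c in normalized) or any(x in word for x in "()[].")
--         ):
--             analysis["potential_identifiers"].append((i, word))
--     return analysis
--
-- def find_section_identifier(text: str) -> Tuple[Optional[str], int]:
--     analysis = analyze_text_structure(text)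
--     words = analysis.get("words", [])
--     for pos, num in analysis.get("numeric_words", []):
--         if pos <= 2:
--             if pos + 1 < len(words):
--                 nxt = words[pos + 1]
--                 if len(nxt) == 1 and nxt.isalpha():
--                     return num + nxt, pos
--             return num, pos
--     for pos, word in analysis.get("short_alphanum_words", []):
--         if pos <= 3:
--             return word, pos
--     for pos, word in analysis.get("potential_identifiers", []):
--         if pos <= 3:
--             cleaned = normalize_identifier_token(word)
--             if cleaned:
--                 return cleaned, pos
--     return None, -1
--
-- def intelligent_split_section_act(text: str) -> Tuple[Optional[str], Optional[str]]:
--     text = text.strip()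
--     if not text:
--         return None, None
--     words = text.split()
--     if len(words) < 2:
--         return text, ""
--     identifier, pos = find_section_identifier(text)
--     if identifier and pos >= 0:
--         section_words = []
--         if pos > 0:
--             prev_word = words[pos - 1]
--             if len(prev_word) <= 10 and not any(c.isdigit() for c in prev_word):
--                 section_words.append(prev_word)
--         section_words.append(identifier)
--         section = " ".join(section_words).strip()
--         used = set(w.lower() for w in section_words)
--         remaining = [w for w in words if w.lower() not in used]
--         act = " ".join(remaining).strip()
--         return section, act
--     return None, text
-- ===== SOURCE B (Python) =====
-- def normalize_identifier_token(token: str) -> str: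
--     out = []
--     for c in token:
--         if c in "([":
--             break
--         if c.isalnum():
--             out.append(c)
--     return "".join(out)
--
-- def intelligent_split_section_act(text):
--     text = text.strip()
--     if not text:
--         return None, None
--     words = text.split()
--     if len(words) < 2:
--         return text, ""
--     # one flat candidate pool of (category, position, token) triples, thresholds applied up front
--     candidates = []
--     for i, w in enumerate(words):
--         norm = normalize_identifier_token(w)
--         has_digit = any(c.isdigit() for c in norm)
--         if norm.isdigit():
--             if i <= 2:
--                 candidates.append((0, i, norm))
--         elif len(norm) <= 5 and has_digit and i <= 3:
--             candidates.append((1, i, norm))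
--         if norm and len(w) <= 6 and i <= 3 and (has_digit or any(x in w for x in "()[].")):
--             candidates.append((2, i, norm))
--     if not candidates:
--         return None, text
--     # a single lexicographic minimum replaces A's category-priority rescans
--     cat, pos, identifier = min(candidates, key=lambda c: (c[0], c[1]))
--     if cat == 0 and pos + 1 < len(words):
--         nxt = words[pos + 1]
--         if len(nxt) == 1 and nxt.isalpha():
--             identifier += nxt
--     section_words = []
--     if pos > 0:
--         prev = words[pos - 1]
--         if len(prev) <= 10 and not any(c.isdigit() for c in prev):
--             section_words.append(prev)
--     section_words.append(identifier)
--     section = " ".join(section_words).strip()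
--     used = {w.lower() for w in section_words}
--     act = " ".join(w for w in words if w.lower() not in used).strip()
--     return section, act
-- ===== Notes on version B (the rewrite author's own statement) =====
-- stated objective: alternative
-- what changed: A builds an analysis dict of four candidate lists and then scans three of them in category-priority order with per-category position thresholds; B pools all eligible (category, position, token) triples in one list with the thresholds applied up front and selects the winner as a single lexicographic minimum over the (category, position) key, gluing the following single letter only when the winning category is numeric.
import Mathlib
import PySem

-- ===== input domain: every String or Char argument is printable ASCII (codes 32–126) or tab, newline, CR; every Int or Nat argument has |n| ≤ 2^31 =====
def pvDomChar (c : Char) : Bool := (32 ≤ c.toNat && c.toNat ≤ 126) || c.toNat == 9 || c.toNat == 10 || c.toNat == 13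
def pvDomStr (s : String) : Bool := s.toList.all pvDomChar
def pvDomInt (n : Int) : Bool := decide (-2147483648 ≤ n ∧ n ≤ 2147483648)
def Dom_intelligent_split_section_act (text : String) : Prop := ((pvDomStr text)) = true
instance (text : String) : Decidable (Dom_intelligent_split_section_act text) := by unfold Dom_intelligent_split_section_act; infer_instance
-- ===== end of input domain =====

-- B replaces A's "four candidate lists scanned in category-priority order" with one flat pool of
-- (category, position, token) triples selected by a single lexicographic minimum (objective: alternative).

-- ===== PORT A =====
-- helper normalize_identifier_token, on List Char (strings are handled on the code-point list side)
def pvNormTok : List Char → List Char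
  | [] => []
  | c :: cs =>
    if c = '(' ∨ c = '[' then []                                -- "if c in \"([\": break"
    else if PySem.Chars.isalnum c then c :: pvNormTok cs
    else pvNormTok cs

-- "any(c.isdigit() for c in s)"
def pvHasDigit (cs : List Char) : Bool := cs.any PySem.Chars.isdigit
-- "any(x in word for x in \"()[].\")"
def pvHasPunct (w : List Char) : Bool := "()[].".toList.any (fun x => PySem.Chars.isIn [x] w)

-- the analysis dict of analyze_text_structure (heterogeneous value types → a structure)
structure pvAnalysis where
  words : List (List Char)
  word_count : Int
  numeric_words : List (Int × List Char)
  short_alphanum_words : List (Int × List Char)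
  long_words : List (Int × List Char)
  potential_identifiers : List (Int × List Char)
deriving Repr, DecidableEq

def pvStep (a : pvAnalysis) (iw : Int × List Char) : pvAnalysis :=
  let i := iw.1
  let word := iw.2
  let normalized := pvNormTok word
  let a1 :=
    if PySem.Chars.strIsdigit normalized then
      { a with numeric_words := a.numeric_words ++ [(i, normalized)] }
    else if normalized.length ≤ 5 ∧ pvHasDigit normalized then
      { a with short_alphanum_words := a.short_alphanum_words ++ [(i, normalized)] }
    else if 8 < normalized.length then
      { a with long_words := a.long_words ++ [(i, normalized)] }
    else a
  if word.length ≤ 6 ∧ (pvHasDigit normalized ∨ pvHasPunct word) then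
    { a1 with potential_identifiers := a1.potential_identifiers ++ [(i, word)] }
  else a1

def pvAnalyze (text : List Char) : pvAnalysis :=
  if text = [] then ⟨[], 0, [], [], [], []⟩                      -- "return {}": all .get defaults
  else
    let words := PySem.Chars.split₀ text
    (PySem.List.enumerate words 0).foldl pvStep ⟨words, (words.length : Int), [], [], [], []⟩

-- the numeric return value: "num + nxt" when a single following letter exists
def pvRetNum (words : List (List Char)) (pos : Int) (num : List Char) : List Char :=
  if pos + 1 < (words.length : Int) then
    let nxt := PySem.List.pyGetD words (pos + 1) []
    if nxt.length = 1 ∧ PySem.Chars.strIsalpha nxt then num ++ nxt else num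
  else num

def pvScanNum (words : List (List Char)) : List (Int × List Char) → Option (List Char × Int)
  | [] => none
  | (pos, num) :: rest =>
    if pos ≤ 2 then some (pvRetNum words pos num, pos) else pvScanNum words rest

def pvScanShort : List (Int × List Char) → Option (List Char × Int)
  | [] => none
  | (pos, word) :: rest => if pos ≤ 3 then some (word, pos) else pvScanShort rest

def pvScanPot : List (Int × List Char) → Option (List Char × Int)
  | [] => none
  | (pos, word) :: rest =>
    if pos ≤ 3 then
      let cleaned := pvNormTok word
      if cleaned ≠ [] then some (cleaned, pos) else pvScanPot rest
    else pvScanPot rest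

def pvFindSection (text : List Char) : Option (List Char) × Int :=
  let analysis := pvAnalyze text
  let words := analysis.words
  match pvScanNum words analysis.numeric_words with
  | some (s, p) => (some s, p)
  | none =>
    match pvScanShort analysis.short_alphanum_words with
    | some (s, p) => (some s, p)
    | none =>
      match pvScanPot analysis.potential_identifiers with
      | some (s, p) => (some s, p)
      | none => (none, -1)

-- the final section/act reconstruction (textually identical in A and in B; shared)
def pvBuild (words : List (List Char)) (identifier : List Char) (pos : Int) :
    Option String × Option String :=
  let section_words : List (List Char) :=
    (if 0 < pos then
       let prev := PySem.List.pyGetD words (pos - 1) []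
       if prev.length ≤ 10 ∧ ¬ pvHasDigit prev then [prev] else []
     else []) ++ [identifier]
  let sec := PySem.Chars.strip (PySem.Chars.join [' '] section_words)
  let used := PySem.Set.ofList (section_words.map PySem.Chars.lower)
  let remaining := words.filter (fun w => ! PySem.Set.contains used (PySem.Chars.lower w))
  let act := PySem.Chars.strip (PySem.Chars.join [' '] remaining)
  (some (String.ofList sec), some (String.ofList act))

def intelligent_split_section_act (text : String) : Option String × Option String :=
  let t := PySem.Chars.strip text.toList
  if t = [] then (none, none)
  else
    let words := PySem.Chars.split₀ t
    if words.length < 2 then (some (String.ofList t), some "")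
    else
      match pvFindSection t with
      | (some identifier, pos) =>
        if identifier ≠ [] ∧ 0 ≤ pos then pvBuild words identifier pos
        else (none, some (String.ofList t))
      | (none, _) => (none, some (String.ofList t))

-- ===== PORT B =====
-- Source B's normalize_identifier_token is the same leaf helper; pvNormTok is reused.
-- the candidate-collecting loop body: thresholds applied up front, (category, position, token) triples
def pvCandStep (acc : List (Int × Int × List Char)) (iw : Int × List Char) :
    List (Int × Int × List Char) :=
  let i := iw.1
  let w := iw.2
  let norm := pvNormTok w
  let hd := pvHasDigit norm
  let acc1 :=
    if PySem.Chars.strIsdigit norm then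
      (if i ≤ 2 then acc ++ [(0, i, norm)] else acc)
    else if norm.length ≤ 5 ∧ hd = true ∧ i ≤ 3 then acc ++ [(1, i, norm)]
    else acc
  if norm ≠ [] ∧ w.length ≤ 6 ∧ i ≤ 3 ∧ (hd = true ∨ pvHasPunct w = true) then
    acc1 ++ [(2, i, norm)]
  else acc1

-- "c1 comes strictly before c2 under the key (category, position)"
def pvKlt (c1 c2 : Int × Int × List Char) : Bool :=
  c1.1 < c2.1 || (c1.1 == c2.1 && c1.2.1 < c2.2.1)

-- "min(candidates, key=lambda c: (c[0], c[1]))": fold keeping the earlier element on key ties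
def pvMinStep (b c : Int × Int × List Char) : Int × Int × List Char :=
  if pvKlt c b then c else b

def intelligent_split_section_act_alt (text : String) : Option String × Option String :=
  let t := PySem.Chars.strip text.toList
  if t = [] then (none, none)
  else
    let words := PySem.Chars.split₀ t
    if words.length < 2 then (some (String.ofList t), some "")
    else
      match (PySem.List.enumerate words 0).foldl pvCandStep [] with
      | [] => (none, some (String.ofList t))
      | c :: cs =>
        let best := cs.foldl pvMinStep c
        let identifier :=
          if best.1 = 0 ∧ best.2.1 + 1 < (words.length : Int) then
            let nxt := PySem.List.pyGetD words (best.2.1 + 1) []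
            if nxt.length = 1 ∧ PySem.Chars.strIsalpha nxt then best.2.2 ++ nxt else best.2.2
          else best.2.2
        pvBuild words identifier best.2.1

-- ===== PRECONDITION & SPEC =====
def Spec_intelligent_split_section_act (text : String) (out : Option String × Option String) : Prop := out = intelligent_split_section_act_alt text
instance (text : String) (out : Option String × Option String) : Decidable (Spec_intelligent_split_section_act text out) := by unfold Spec_intelligent_split_section_act; infer_instance

-- ===== CLAIM (what is proved, stated in full; the proofs are below) =====
def Claim_equal_intelligent_split_section_act : Prop := ∀ (text : String), Dom_intelligent_split_section_act text → Spec_intelligent_split_section_act text (intelligent_split_section_act text)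

-- ===== LEMMAS AND PROOFS =====

-- the per-word selectors of A's four lists (A appends each word's contribution for each category)
def pvFN (iw : Int × List Char) : Option (Int × List Char) :=
  if PySem.Chars.strIsdigit (pvNormTok iw.2) then some (iw.1, pvNormTok iw.2) else none

def pvFS (iw : Int × List Char) : Option (Int × List Char) :=
  if ¬ PySem.Chars.strIsdigit (pvNormTok iw.2) ∧ (pvNormTok iw.2).length ≤ 5 ∧ pvHasDigit (pvNormTok iw.2) then
    some (iw.1, pvNormTok iw.2)
  else none

def pvFL (iw : Int × List Char) : Option (Int × List Char) :=
  if ¬ PySem.Chars.strIsdigit (pvNormTok iw.2) ∧ ¬ ((pvNormTok iw.2).length ≤ 5 ∧ pvHasDigit (pvNormTok iw.2)) ∧ 8 < (pvNormTok iw.2).length then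
    some (iw.1, pvNormTok iw.2)
  else none

def pvFPA (iw : Int × List Char) : Option (Int × List Char) :=
  if iw.2.length ≤ 6 ∧ (pvHasDigit (pvNormTok iw.2) ∨ pvHasPunct iw.2) then some (iw.1, iw.2) else none

-- the thresholded selectors both sides reduce to: G0 = numeric ∧ pos ≤ 2, G1 = short ∧ pos ≤ 3,
-- G2 = potential ∧ pos ≤ 3 ∧ nonempty normalization
def pvG0 (iw : Int × List Char) : Option (Int × List Char) :=
  if PySem.Chars.strIsdigit (pvNormTok iw.2) ∧ iw.1 ≤ 2 then some (iw.1, pvNormTok iw.2) else none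

def pvG1 (iw : Int × List Char) : Option (Int × List Char) :=
  if ¬ PySem.Chars.strIsdigit (pvNormTok iw.2) ∧ (pvNormTok iw.2).length ≤ 5 ∧ pvHasDigit (pvNormTok iw.2) ∧ iw.1 ≤ 3 then
    some (iw.1, pvNormTok iw.2)
  else none

def pvG2 (iw : Int × List Char) : Option (Int × List Char) :=
  if pvNormTok iw.2 ≠ [] ∧ iw.2.length ≤ 6 ∧ iw.1 ≤ 3 ∧ (pvHasDigit (pvNormTok iw.2) ∨ pvHasPunct iw.2) then
    some (iw.1, pvNormTok iw.2)
  else none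

-- the "p ≤ 3 and nonempty cleaned" filter applied by A's potential scan
def pvCl (pw : Int × List Char) : Option (Int × List Char) :=
  if pw.1 ≤ 3 ∧ pvNormTok pw.2 ≠ [] then some (pw.1, pvNormTok pw.2) else none

-- A's priority pick, expressed on the thresholded heads
def pvChoose (E : List (Int × List Char)) : Option (Int × Int × List Char) :=
  match (E.filterMap pvG0).head? with
  | some pn => some (0, pn.1, pn.2)
  | none =>
    match (E.filterMap pvG1).head? with
    | some pn => some (1, pn.1, pn.2)
    | none =>
      match (E.filterMap pvG2).head? with
      | some pn => some (2, pn.1, pn.2)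
      | none => none

-- B's per-word candidate contribution (the two appends of pvCandStep)
def pvC0 (iw : Int × List Char) : Option (Int × Int × List Char) :=
  if PySem.Chars.strIsdigit (pvNormTok iw.2) then
    (if iw.1 ≤ 2 then some (0, iw.1, pvNormTok iw.2) else none)
  else if (pvNormTok iw.2).length ≤ 5 ∧ pvHasDigit (pvNormTok iw.2) = true ∧ iw.1 ≤ 3 then
    some (1, iw.1, pvNormTok iw.2)
  else none

def pvC2 (iw : Int × List Char) : Option (Int × Int × List Char) :=
  if pvNormTok iw.2 ≠ [] ∧ iw.2.length ≤ 6 ∧ iw.1 ≤ 3 ∧ (pvHasDigit (pvNormTok iw.2) = true ∨ pvHasPunct iw.2 = true) then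
    some (2, iw.1, pvNormTok iw.2)
  else none

def pvSel (iw : Int × List Char) : List (Int × Int × List Char) :=
  (pvC0 iw).toList ++ (pvC2 iw).toList

-- first-argmin of a candidate list under the (category, position) key, right-fold form
def pvFM : List (Int × Int × List Char) → Option (Int × Int × List Char)
  | [] => none
  | c :: cs =>
    match pvFM cs with
    | none => some c
    | some b => if pvKlt b c then some b else some c

-- option-level combination of two first-argmins
def pvComb : Option (Int × Int × List Char) → Option (Int × Int × List Char) →
    Option (Int × Int × List Char)
  | none, fb => fb
  | some a, none => some a
  | some a, some b => if pvKlt b a then some b else some a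

theorem pvComb_assoc (a b c : Option (Int × Int × List Char)) :
    pvComb (pvComb a b) c = pvComb a (pvComb b c) := by
  cases a with
  | none => rfl
  | some x =>
    cases b with
    | none => rfl
    | some y =>
      cases c with
      | none =>
        by_cases h : pvKlt y x = true <;> simp [pvComb, h]
      | some z =>
        obtain ⟨x1, x2, x3⟩ := x
        obtain ⟨y1, y2, y3⟩ := y
        obtain ⟨z1, z2, z3⟩ := z
        simp only [pvComb, pvKlt, Bool.or_eq_true, Bool.and_eq_true, decide_eq_true_eq,
          beq_iff_eq]
        split_ifs <;> (try rfl) <;> dsimp only <;> split_ifs <;>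
          first | rfl | (exfalso; omega)

theorem pvFM_cons (c : Int × Int × List Char) (cs : List (Int × Int × List Char)) :
    pvFM (c :: cs) = pvComb (some c) (pvFM cs) := by
  cases h : pvFM cs <;> simp [pvFM, pvComb, h]

theorem pvFM_append (xs ys : List (Int × Int × List Char)) :
    pvFM (xs ++ ys) = pvComb (pvFM xs) (pvFM ys) := by
  induction xs with
  | nil => rfl
  | cons c xs ih =>
    rw [List.cons_append, pvFM_cons, ih, ← pvComb_assoc, ← pvFM_cons]

theorem pvFoldMin (cs : List (Int × Int × List Char)) (c : Int × Int × List Char) :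
    some (cs.foldl pvMinStep c) = pvComb (some c) (pvFM cs) := by
  induction cs generalizing c with
  | nil => rfl
  | cons d cs ih =>
    rw [List.foldl_cons, ih, pvFM_cons, ← pvComb_assoc]
    have : pvComb (some c) (some d) = some (pvMinStep c d) := by
      by_cases h : pvKlt d c = true <;> simp [pvComb, pvMinStep, h]
    rw [this]

theorem pvCandStep_eq (acc : List (Int × Int × List Char)) (iw : Int × List Char) :
    pvCandStep acc iw = acc ++ pvSel iw := by
  simp only [pvCandStep, pvSel, pvC0, pvC2]
  split_ifs <;> simp_all [Option.toList]

theorem pvCandFold (E : List (Int × List Char)) (acc : List (Int × Int × List Char)) :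
    E.foldl pvCandStep acc = acc ++ E.flatMap pvSel := by
  induction E generalizing acc with
  | nil => simp
  | cons x E ih =>
    rw [List.foldl_cons, pvCandStep_eq, ih, List.flatMap_cons, List.append_assoc]

-- A-side: the analysis record is the three filterMaps
theorem pvStep_eq (a : pvAnalysis) (iw : Int × List Char) :
    pvStep a iw =
      { a with
        numeric_words := a.numeric_words ++ (pvFN iw).toList,
        short_alphanum_words := a.short_alphanum_words ++ (pvFS iw).toList,
        long_words := a.long_words ++ (pvFL iw).toList,
        potential_identifiers := a.potential_identifiers ++ (pvFPA iw).toList } := by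
  unfold pvStep pvFN pvFS pvFL pvFPA
  split_ifs <;> simp_all [Option.toList] <;> (try (split_ifs <;> simp_all)) <;> omega

theorem pvFoldA (E : List (Int × List Char)) (a : pvAnalysis) :
    E.foldl pvStep a =
      { a with
        numeric_words := a.numeric_words ++ E.filterMap pvFN,
        short_alphanum_words := a.short_alphanum_words ++ E.filterMap pvFS,
        long_words := a.long_words ++ E.filterMap pvFL,
        potential_identifiers := a.potential_identifiers ++ E.filterMap pvFPA } := by
  induction E generalizing a with
  | nil => simp
  | cons x E ih =>
    rw [List.foldl_cons, pvStep_eq, ih]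
    cases hn : pvFN x <;> cases hs : pvFS x <;> cases hl : pvFL x <;> cases hp : pvFPA x <;>
      simp [List.filterMap_cons, hn, hs, hl, hp, Option.toList]

-- A's scans are head? of a filtered list (no ordering hypotheses needed: the scans skip and continue)
theorem pvScanNum_eq (words : List (List Char)) (l : List (Int × List Char)) :
    pvScanNum words l =
      ((l.filter (fun x => decide (x.1 ≤ 2))).head?).map
        (fun pn => (pvRetNum words pn.1 pn.2, pn.1)) := by
  induction l with
  | nil => rfl
  | cons x rest ih =>
    obtain ⟨p, n⟩ := x
    by_cases h : p ≤ 2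
    · simp [pvScanNum, h, List.filter_cons]
    · simp [pvScanNum, h, List.filter_cons, ih]

theorem pvScanShort_eq (l : List (Int × List Char)) :
    pvScanShort l =
      ((l.filter (fun x => decide (x.1 ≤ 3))).head?).map (fun pn => (pn.2, pn.1)) := by
  induction l with
  | nil => rfl
  | cons x rest ih =>
    obtain ⟨p, n⟩ := x
    by_cases h : p ≤ 3
    · simp [pvScanShort, h, List.filter_cons]
    · simp [pvScanShort, h, List.filter_cons, ih]

theorem pvScanPot_eq (l : List (Int × List Char)) :
    pvScanPot l = ((l.filterMap pvCl).head?).map (fun pn => (pn.2, pn.1)) := by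
  induction l with
  | nil => rfl
  | cons x rest ih =>
    obtain ⟨p, w⟩ := x
    by_cases h : p ≤ 3
    · by_cases hc : pvNormTok w ≠ []
      · simp [pvScanPot, h, hc, List.filterMap_cons, pvCl]
      · simp only [ne_eq, not_not] at hc
        simp [pvScanPot, h, hc, List.filterMap_cons, pvCl, ih]
    · simp [pvScanPot, h, List.filterMap_cons, pvCl, ih]

-- fusions: A's list-then-threshold equals the thresholded selector
theorem pvFuse0 (E : List (Int × List Char)) :
    (E.filterMap pvFN).filter (fun x => decide (x.1 ≤ 2)) = E.filterMap pvG0 := by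
  induction E with
  | nil => rfl
  | cons x E ih =>
    rw [List.filterMap_cons, List.filterMap_cons]
    by_cases hd : PySem.Chars.strIsdigit (pvNormTok x.2) = true
    · by_cases hi : x.1 ≤ 2
      · rw [show pvFN x = some (x.1, pvNormTok x.2) by simp [pvFN, hd],
            show pvG0 x = some (x.1, pvNormTok x.2) by simp [pvG0, hd, hi],
            List.filter_cons]
        simp [hi, ih]
      · rw [show pvFN x = some (x.1, pvNormTok x.2) by simp [pvFN, hd],
            show pvG0 x = none by simp [pvG0, hd, hi], List.filter_cons]
        simp [hi, ih]
    · rw [show pvFN x = none by simp [pvFN, hd], show pvG0 x = none by simp [pvG0, hd]]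
      exact ih

theorem pvFuse1 (E : List (Int × List Char)) :
    (E.filterMap pvFS).filter (fun x => decide (x.1 ≤ 3)) = E.filterMap pvG1 := by
  induction E with
  | nil => rfl
  | cons x E ih =>
    rw [List.filterMap_cons, List.filterMap_cons]
    by_cases hc : ¬ PySem.Chars.strIsdigit (pvNormTok x.2) = true ∧
        (pvNormTok x.2).length ≤ 5 ∧ pvHasDigit (pvNormTok x.2) = true
    · by_cases hi : x.1 ≤ 3
      · rw [show pvFS x = some (x.1, pvNormTok x.2) by
              unfold pvFS; rw [if_pos ⟨hc.1, hc.2.1, hc.2.2⟩],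
            show pvG1 x = some (x.1, pvNormTok x.2) by
              unfold pvG1; rw [if_pos ⟨hc.1, hc.2.1, hc.2.2, hi⟩],
            List.filter_cons]
        simp [hi, ih]
      · rw [show pvFS x = some (x.1, pvNormTok x.2) by
              unfold pvFS; rw [if_pos ⟨hc.1, hc.2.1, hc.2.2⟩],
            show pvG1 x = none by
              unfold pvG1; rw [if_neg (fun h => hi h.2.2.2)],
            List.filter_cons]
        simp [hi, ih]
    · rw [show pvFS x = none by
            unfold pvFS; rw [if_neg]; exact fun h => hc ⟨h.1, h.2.1, h.2.2⟩,
          show pvG1 x = none by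
            unfold pvG1; rw [if_neg]; exact fun h => hc ⟨h.1, h.2.1, h.2.2.1⟩]
      exact ih

theorem pvFuse2 (E : List (Int × List Char)) :
    (E.filterMap pvFPA).filterMap pvCl = E.filterMap pvG2 := by
  rw [List.filterMap_filterMap]
  apply List.filterMap_congr
  intro iw _
  by_cases h1 : iw.2.length ≤ 6 ∧ (pvHasDigit (pvNormTok iw.2) = true ∨ pvHasPunct iw.2 = true)
  · by_cases h2 : iw.1 ≤ 3 ∧ pvNormTok iw.2 ≠ []
    · have hg : pvG2 iw = some (iw.1, pvNormTok iw.2) := by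
        unfold pvG2; rw [if_pos ⟨h2.2, h1.1, h2.1, h1.2⟩]
      simp [pvFPA, pvCl, h1, h2, hg]
    · have hg : pvG2 iw = none := by
        unfold pvG2; rw [if_neg]; exact fun h => h2 ⟨h.2.2.1, h.1⟩
      simp [pvFPA, pvCl, h1, h2, hg]
  · have hg : pvG2 iw = none := by
      unfold pvG2; rw [if_neg]; exact fun h => h1 ⟨h.2.1, h.2.2.2⟩
    simp [pvFPA, h1, hg]

-- A's find, rewritten on pvChoose
theorem pvFind_eq (t : List Char) (ht : ¬ t = []) :
    pvFindSection t =
      (match pvChoose (PySem.List.enumerate (PySem.Chars.split₀ t) 0) with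
       | some m =>
         (some (if m.1 = 0 then pvRetNum (PySem.Chars.split₀ t) m.2.1 m.2.2 else m.2.2), m.2.1)
       | none => (none, -1)) := by
  unfold pvFindSection pvAnalyze
  rw [if_neg ht, pvFoldA]
  simp only [List.nil_append]
  rw [pvScanNum_eq, pvScanShort_eq, pvScanPot_eq, pvFuse0, pvFuse1, pvFuse2]
  unfold pvChoose
  cases h0 : ((PySem.List.enumerate (PySem.Chars.split₀ t) 0).filterMap pvG0).head? with
  | some pn => simp [h0]
  | none =>
    cases h1 : ((PySem.List.enumerate (PySem.Chars.split₀ t) 0).filterMap pvG1).head? with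
    | some pn => simp [h0, h1]
    | none =>
      cases h2 : ((PySem.List.enumerate (PySem.Chars.split₀ t) 0).filterMap pvG2).head? with
      | some pn => simp [h0, h1, h2]
      | none => simp [h0, h1, h2]

-- B-side: the first-argmin of the flat pool is A's priority pick
theorem pvC0_char (iw : Int × List Char) :
    (∃ n, pvG0 iw = some (iw.1, n) ∧ pvG1 iw = none ∧ pvC0 iw = some (0, iw.1, n)) ∨
    (∃ n, pvG0 iw = none ∧ pvG1 iw = some (iw.1, n) ∧ pvC0 iw = some (1, iw.1, n)) ∨
    (pvG0 iw = none ∧ pvG1 iw = none ∧ pvC0 iw = none) := by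
  by_cases hd : PySem.Chars.strIsdigit (pvNormTok iw.2) = true
  · by_cases hi : iw.1 ≤ 2
    · refine Or.inl ⟨pvNormTok iw.2, by simp [pvG0, hd, hi], ?_, by simp [pvC0, hd, hi]⟩
      unfold pvG1; rw [if_neg (fun h => h.1 hd)]
    · refine Or.inr (Or.inr ⟨by simp [pvG0, hd, hi], ?_, by simp [pvC0, hd, hi]⟩)
      unfold pvG1; rw [if_neg (fun h => h.1 hd)]
  · by_cases hs : (pvNormTok iw.2).length ≤ 5 ∧ pvHasDigit (pvNormTok iw.2) = true ∧ iw.1 ≤ 3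
    · refine Or.inr (Or.inl ⟨pvNormTok iw.2, by simp [pvG0, hd], ?_, ?_⟩)
      · unfold pvG1; rw [if_pos ⟨hd, hs.1, hs.2.1, hs.2.2⟩]
      · unfold pvC0; rw [if_neg hd, if_pos hs]
    · refine Or.inr (Or.inr ⟨by simp [pvG0, hd], ?_, ?_⟩)
      · unfold pvG1; rw [if_neg (fun h => hs ⟨h.2.1, h.2.2.1, h.2.2.2⟩)]
      · unfold pvC0; rw [if_neg hd, if_neg hs]

theorem pvC2_char (iw : Int × List Char) :
    (∃ n, pvG2 iw = some (iw.1, n) ∧ pvC2 iw = some (2, iw.1, n)) ∨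
    (pvG2 iw = none ∧ pvC2 iw = none) := by
  by_cases h : pvNormTok iw.2 ≠ [] ∧ iw.2.length ≤ 6 ∧ iw.1 ≤ 3 ∧
      (pvHasDigit (pvNormTok iw.2) = true ∨ pvHasPunct iw.2 = true)
  · exact Or.inl ⟨pvNormTok iw.2, by unfold pvG2; rw [if_pos h], by unfold pvC2; rw [if_pos h]⟩
  · exact Or.inr ⟨by unfold pvG2; rw [if_neg h], by unfold pvC2; rw [if_neg h]⟩

theorem pvHeadIdx {f : Int × List Char → Option (Int × List Char)}
    (hf : ∀ iw v, f iw = some v → v.1 = iw.1) {E : List (Int × List Char)} {x0 : Int}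
    (hlt : ∀ y ∈ E, x0 < y.1) {pn : Int × List Char}
    (h : (E.filterMap f).head? = some pn) : x0 < pn.1 := by
  have hmem := List.mem_of_mem_head? h
  rw [List.mem_filterMap] at hmem
  obtain ⟨iw, hiw, hfv⟩ := hmem
  rw [hf iw pn hfv]
  exact hlt iw hiw

theorem pvMain (E : List (Int × List Char)) (hp : E.Pairwise (fun a b => a.1 < b.1)) :
    pvFM (E.flatMap pvSel) = pvChoose E := by
  induction E with
  | nil => rfl
  | cons x E ih =>
    rw [List.pairwise_cons] at hp
    obtain ⟨hlt, hp'⟩ := hp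
    rw [List.flatMap_cons, pvFM_append, ih hp']
    have hsel : pvFM (pvSel x) = pvComb (pvC0 x) (pvC2 x) := by
      unfold pvSel
      cases pvC0 x <;> cases pvC2 x <;> simp [pvFM, pvComb, Option.toList]
    rw [hsel, pvComb_assoc]
    have hf0 : ∀ iw v, pvG0 iw = some v → v.1 = iw.1 := by
      intro iw v hv; unfold pvG0 at hv; split_ifs at hv
      simp only [Option.some.injEq] at hv; rw [← hv]
    have hf1 : ∀ iw v, pvG1 iw = some v → v.1 = iw.1 := by
      intro iw v hv; unfold pvG1 at hv; split_ifs at hv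
      simp only [Option.some.injEq] at hv; rw [← hv]
    have hf2 : ∀ iw v, pvG2 iw = some v → v.1 = iw.1 := by
      intro iw v hv; unfold pvG2 at hv; split_ifs at hv
      simp only [Option.some.injEq] at hv; rw [← hv]
    rcases pvC0_char x with ⟨n, hg0, hg1, hc0⟩ | ⟨n, hg0, hg1, hc0⟩ | ⟨hg0, hg1, hc0⟩ <;>
    rcases pvC2_char x with ⟨n2, hg2, hc2⟩ | ⟨hg2, hc2⟩
    all_goals (
    rcases hE0 : (List.filterMap pvG0 E).head? with _ | ⟨p0, m0⟩ <;>
    rcases hE1 : (List.filterMap pvG1 E).head? with _ | ⟨p1, m1⟩ <;>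
    rcases hE2 : (List.filterMap pvG2 E).head? with _ | ⟨p2, m2⟩ <;>
    (try have hi0 : x.1 < p0 := by simpa using pvHeadIdx hf0 hlt hE0) <;>
    (try have hi1 : x.1 < p1 := by simpa using pvHeadIdx hf1 hlt hE1) <;>
    (try have hi2 : x.1 < p2 := by simpa using pvHeadIdx hf2 hlt hE2) <;>
    simp only [pvChoose, List.filterMap_cons, hg0, hg1, hg2, hc0, hc2, hE0, hE1, hE2,
      List.head?_cons, pvComb, pvKlt, Bool.or_eq_true, Bool.and_eq_true, decide_eq_true_eq,
      beq_iff_eq] <;>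
    (try split_ifs) <;> (try rfl) <;> (try (exfalso; omega)) <;>
    (try dsimp only) <;> (try split_ifs) <;> (try rfl) <;> (try (exfalso; omega)) <;>
    (try dsimp only) <;> (try split_ifs) <;> first | rfl | (exfalso; omega))

-- soundness of the pick: nonnegative position, nonempty token
theorem pvGmem_sound {words : List (List Char)} {pn : Int × List Char}
    {f : Int × List Char → Option (Int × List Char)}
    (hmem : pn ∈ (PySem.List.enumerate words 0).filterMap f)
    (hf : ∀ iw v, f iw = some v → v.1 = iw.1)
    (hne : ∀ iw v, f iw = some v → v.2 ≠ []) : 0 ≤ pn.1 ∧ pn.2 ≠ [] := by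
  rw [List.mem_filterMap] at hmem
  obtain ⟨iw, hiw, hfv⟩ := hmem
  rw [PySem.List.mem_enumerate_iff] at hiw
  obtain ⟨k, hk, hiw⟩ := hiw
  refine ⟨?_, hne iw pn hfv⟩
  rw [hf iw pn hfv, hiw]
  simp

theorem pvChoose_sound (words : List (List Char)) (m : Int × Int × List Char)
    (h : pvChoose (PySem.List.enumerate words 0) = some m) :
    0 ≤ m.2.1 ∧ m.2.2 ≠ [] := by
  have hne0 : ∀ iw v, pvG0 iw = some v → v.2 ≠ [] := by
    intro iw v hv; unfold pvG0 at hv; split_ifs at hv with hc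
    simp only [Option.some.injEq] at hv
    rw [← hv]; dsimp only; intro hnil
    rw [hnil] at hc
    simp [PySem.Chars.strIsdigit] at hc
  have hne1 : ∀ iw v, pvG1 iw = some v → v.2 ≠ [] := by
    intro iw v hv; unfold pvG1 at hv; split_ifs at hv with hc
    simp only [Option.some.injEq] at hv
    rw [← hv]; dsimp only; intro hnil
    rw [hnil] at hc
    simp [pvHasDigit] at hc
  have hne2 : ∀ iw v, pvG2 iw = some v → v.2 ≠ [] := by
    intro iw v hv; unfold pvG2 at hv; split_ifs at hv with hc
    simp only [Option.some.injEq] at hv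
    rw [← hv]; exact hc.1
  have hf0 : ∀ iw v, pvG0 iw = some v → v.1 = iw.1 := by
    intro iw v hv; unfold pvG0 at hv; split_ifs at hv
    simp only [Option.some.injEq] at hv; rw [← hv]
  have hf1 : ∀ iw v, pvG1 iw = some v → v.1 = iw.1 := by
    intro iw v hv; unfold pvG1 at hv; split_ifs at hv
    simp only [Option.some.injEq] at hv; rw [← hv]
  have hf2 : ∀ iw v, pvG2 iw = some v → v.1 = iw.1 := by
    intro iw v hv; unfold pvG2 at hv; split_ifs at hv
    simp only [Option.some.injEq] at hv; rw [← hv]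
  unfold pvChoose at h
  cases h0 : ((PySem.List.enumerate words 0).filterMap pvG0).head? with
  | some pn =>
    rw [h0] at h
    simp only [Option.some.injEq] at h
    have := pvGmem_sound (List.mem_of_mem_head? h0) hf0 hne0
    rw [← h]
    exact this
  | none =>
    rw [h0] at h
    cases h1 : ((PySem.List.enumerate words 0).filterMap pvG1).head? with
    | some pn =>
      rw [h1] at h
      simp only [Option.some.injEq] at h
      have := pvGmem_sound (List.mem_of_mem_head? h1) hf1 hne1
      rw [← h]
      exact this
    | none =>
      rw [h1] at h
      cases h2 : ((PySem.List.enumerate words 0).filterMap pvG2).head? with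
      | some pn =>
        rw [h2] at h
        simp only [Option.some.injEq] at h
        have := pvGmem_sound (List.mem_of_mem_head? h2) hf2 hne2
        rw [← h]
        exact this
      | none => rw [h2] at h; cases h

theorem pvRetNum_ne_nil (words : List (List Char)) (p : Int) (n : List Char) (hn : n ≠ []) :
    pvRetNum words p n ≠ [] := by
  unfold pvRetNum
  split_ifs with h1
  · dsimp only
    split_ifs with h2 <;> simp [hn]
  · exact hn

-- ===== VERDICT (by name: the statement is the Claim_ definition above) =====
theorem intelligent_split_section_act_spec : Claim_equal_intelligent_split_section_act := by
  intro text _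
  unfold Spec_intelligent_split_section_act
  unfold intelligent_split_section_act intelligent_split_section_act_alt
  by_cases ht : PySem.Chars.strip text.toList = []
  · simp [ht]
  · simp only [if_neg ht]
    by_cases hw : (PySem.Chars.split₀ (PySem.Chars.strip text.toList)).length < 2
    · simp [hw]
    · simp only [if_neg hw]
      rw [pvFind_eq _ ht, pvCandFold]
      simp only [List.nil_append]
      have hM := pvMain (PySem.List.enumerate (PySem.Chars.split₀ (PySem.Chars.strip text.toList)) 0)
        (PySem.List.pairwise_lt_enumerate _ _)
      cases hcands : (PySem.List.enumerate (PySem.Chars.split₀ (PySem.Chars.strip text.toList)) 0).flatMap pvSel with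
      | nil =>
        rw [hcands] at hM
        rw [← hM]
        simp [pvFM]
      | cons c cs =>
        rw [hcands] at hM
        have hbest : some (cs.foldl pvMinStep c) = pvChoose (PySem.List.enumerate (PySem.Chars.split₀ (PySem.Chars.strip text.toList)) 0) := by
          rw [pvFoldMin, ← pvFM_cons, hM]
        rw [← hbest]
        have hs := pvChoose_sound _ _ hbest.symm
        dsimp only
        by_cases hcat : (cs.foldl pvMinStep c).1 = 0
        · have hidA : (if (cs.foldl pvMinStep c).1 = 0 then
              pvRetNum (PySem.Chars.split₀ (PySem.Chars.strip text.toList)) (cs.foldl pvMinStep c).2.1 (cs.foldl pvMinStep c).2.2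
            else (cs.foldl pvMinStep c).2.2) ≠ [] := by
            rw [if_pos hcat]
            exact pvRetNum_ne_nil _ _ _ hs.2
          rw [if_pos ⟨hidA, hs.1⟩]
          unfold pvRetNum
          by_cases hl : (cs.foldl pvMinStep c).2.1 + 1 < ((PySem.Chars.split₀ (PySem.Chars.strip text.toList)).length : Int) <;>
            simp [hcat, hl]
        · have hidA : (if (cs.foldl pvMinStep c).1 = 0 then
              pvRetNum (PySem.Chars.split₀ (PySem.Chars.strip text.toList)) (cs.foldl pvMinStep c).2.1 (cs.foldl pvMinStep c).2.2
            else (cs.foldl pvMinStep c).2.2) ≠ [] := by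
            rw [if_neg hcat]
            exact hs.2
          rw [if_pos ⟨hidA, hs.1⟩]
          simp [hcat]
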